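-- pv_equiv track=rewrite | github.com/chiboreache/plasma_servicemenus | import_to_kdenlive_script.py | parse_comma_list
-- ===== SOURCE A (Python) =====
-- def parse_comma_list(path_list):
--     rs = []
--     ph = ""
--     for tkn in path_list.split():
--         if tkn.endswith('.mp4'):
--             ph += ' ' + tkn
--             rs.append(ph.strip())
--             ph = ""
--         else:
--             ph += ' ' + tkn
--     return ','.join(rs).replace(' ', r'\ ')
-- ===== SOURCE B (Python) =====
-- def parse_comma_list(path_list):
--     def groups(tokens):
--         i = next((k for k, t in enumerate(tokens) if t.endswith('.mp4')), None)
--         if i is None: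
--             return []
--         return [' '.join(tokens[:i + 1])] + groups(tokens[i + 1:])
--     return ','.join(groups(path_list.split())).replace(' ', r'\ ')
-- ===== Notes on version B (the rewrite author's own statement) =====
-- stated objective: alternative
-- what changed: Replaces A's single-pass running-string accumulator (growing a pending string and stripping it at each group boundary) with a find-boundary-then-slice recursion: locate the first token carrying the video-file suffix, join the token prefix up to it with single spaces, and recurse on the remaining tokens.
import Mathlib
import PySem

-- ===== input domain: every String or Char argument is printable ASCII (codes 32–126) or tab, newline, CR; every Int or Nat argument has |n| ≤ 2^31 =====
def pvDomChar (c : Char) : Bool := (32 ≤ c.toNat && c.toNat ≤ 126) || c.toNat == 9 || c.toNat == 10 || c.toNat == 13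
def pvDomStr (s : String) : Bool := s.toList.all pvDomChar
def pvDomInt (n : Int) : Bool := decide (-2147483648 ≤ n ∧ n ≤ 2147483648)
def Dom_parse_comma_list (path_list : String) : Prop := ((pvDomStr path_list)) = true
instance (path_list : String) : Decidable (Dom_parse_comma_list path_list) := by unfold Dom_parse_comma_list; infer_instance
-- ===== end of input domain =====

-- B replaces A's running-string accumulator with a find-first-'.mp4'-boundary-then-slice
-- recursion over the token list; same cost, a genuinely different decomposition.


-- ===== PORT A =====
-- the loop body: state (rs, ph); on a '.mp4' token append strip(ph + ' ' + tkn) to rs and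
-- reset ph, otherwise grow ph (strings handled as List Char via PySem.Chars, exact)
def pvAStep (st : List (List Char) × List Char) (tkn : List Char) :
    List (List Char) × List Char :=
  if PySem.Chars.endswith tkn ['.', 'm', 'p', '4'] then
    (st.1 ++ [PySem.Chars.strip (st.2 ++ ' ' :: tkn)], [])
  else
    (st.1, st.2 ++ ' ' :: tkn)

def parse_comma_list (path_list : String) : String :=
  let r := (PySem.Chars.split₀ path_list.toList).foldl pvAStep ([], [])
  String.ofList (PySem.Chars.replace (PySem.Chars.join [','] r.1) [' '] ['\\', ' '])

-- ===== PORT B =====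
-- Source B's groups(tokens): index of the first '.mp4' token (none → []), else join the
-- prefix through it with single spaces and recurse on the rest
def pvBGroups (tokens : List (List Char)) : List (List Char) :=
  match h : tokens.findIdx? (fun t => PySem.Chars.endswith t ['.', 'm', 'p', '4']) with
  | none => []
  | some i =>
      [PySem.Chars.join [' '] (tokens.take (i + 1))] ++ pvBGroups (tokens.drop (i + 1))
termination_by tokens.length
decreasing_by
  have hne : tokens ≠ [] := by rintro rfl; simp at h
  have : 0 < tokens.length := List.length_pos_iff.mpr hne
  simp [List.length_drop]; omega

def parse_comma_list_alt (path_list : String) : String :=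
  String.ofList
    (PySem.Chars.replace
      (PySem.Chars.join [','] (pvBGroups (PySem.Chars.split₀ path_list.toList)))
      [' '] ['\\', ' '])

-- ===== PRECONDITION & SPEC =====
def Spec_parse_comma_list (path_list : String) (out : String) : Prop := out = parse_comma_list_alt path_list
instance (path_list : String) (out : String) : Decidable (Spec_parse_comma_list path_list out) := by unfold Spec_parse_comma_list; infer_instance

-- ===== CLAIM (what is proved, stated in full; the proofs are below) =====
def Claim_equal_parse_comma_list : Prop := ∀ (path_list : String), Dom_parse_comma_list path_list → Spec_parse_comma_list path_list (parse_comma_list path_list)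

-- ===== LEMMAS AND PROOFS =====

-- a token is nonempty and whitespace-free
def pvGood (t : List Char) : Prop := t ≠ [] ∧ ∀ c ∈ t, PySem.Chars.isspace c = false

-- ph as a function of the pending group g of tokens
def pvPh (g : List (List Char)) : List Char := (g.map (fun t => ' ' :: t)).flatten

-- A's remaining output with pending group g
def pvPend (g : List (List Char)) : List (List Char) → List (List Char)
  | [] => []
  | t :: rest =>
      if PySem.Chars.endswith t ['.', 'm', 'p', '4'] then
        PySem.Chars.join [' '] (g ++ [t]) :: pvPend [] rest
      else
        pvPend (g ++ [t]) rest

lemma pvBGroupsEq (tokens : List (List Char)) :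
    pvBGroups tokens =
      match tokens.findIdx? (fun t => PySem.Chars.endswith t ['.', 'm', 'p', '4']) with
      | none => []
      | some i =>
          PySem.Chars.join [' '] (tokens.take (i + 1)) :: pvBGroups (tokens.drop (i + 1)) := by
  cases hfi : tokens.findIdx? (fun t => PySem.Chars.endswith t ['.', 'm', 'p', '4']) with
  | none => rw [pvBGroups]; split <;> simp_all
  | some i => rw [pvBGroups]; split <;> simp_all

lemma pvSplitGoGood :
    ∀ (s cur : List Char) (acc : List (List Char)),
      (∀ c ∈ cur, PySem.Chars.isspace c = false) →
      (∀ t ∈ acc, pvGood t) →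
      ∀ t ∈ PySem.Chars.split₀.go s cur acc, pvGood t := by
  intro s
  induction s with
  | nil =>
      intro cur acc hcur hacc t ht
      simp [PySem.Chars.split₀.go] at ht
      split at ht
      · simp at ht; exact hacc t ht
      · simp at ht
        rcases ht with h | h
        · exact hacc t h
        · subst h
          constructor
          · simpa using by
              rename_i hcurne
              simpa [List.isEmpty_iff] using hcurne
          · intro c hc; exact hcur c (by simpa using hc)
  | cons c rest ih =>
      intro cur acc hcur hacc t ht
      simp only [PySem.Chars.split₀.go] at ht
      split at ht
      · split at ht
        · exact ih [] acc (by simp) hacc t ht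
        · refine ih [] _ (by simp) ?_ t ht
          intro u hu
          rcases List.mem_cons.mp hu with h | h
          · subst h
            refine ⟨?_, ?_⟩
            · rename_i hcurne; simpa [List.isEmpty_iff] using hcurne
            · intro d hd; exact hcur d (by simpa using hd)
          · exact hacc u h
      · refine ih (c :: cur) acc ?_ hacc t ht
        intro d hd
        rcases List.mem_cons.mp hd with h | h
        · subst h; rename_i hns; simpa using hns
        · exact hcur d h

lemma pvSplitGood (s : List Char) : ∀ t ∈ PySem.Chars.split₀ s, pvGood t :=
  pvSplitGoGood s [] [] (by simp) (by simp)

lemma pvJoinHead (g : List (List Char)) (hg : g ≠ []) (h : ∀ t ∈ g, pvGood t) :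
    ∃ c cs, PySem.Chars.join [' '] g = c :: cs ∧ PySem.Chars.isspace c = false := by
  induction g with
  | nil => exact absurd rfl hg
  | cons a l ih =>
      obtain ⟨hane, haw⟩ := h a (by simp)
      obtain ⟨c, cs, hac⟩ := List.exists_cons_of_ne_nil hane
      cases l with
      | nil =>
          exact ⟨c, cs, by rw [PySem.Chars.join_singleton, hac], haw c (by simp [hac])⟩
      | cons b l' =>
          refine ⟨c, cs ++ [' '] ++ PySem.Chars.join [' '] (b :: l'), ?_, haw c (by simp [hac])⟩
          rw [PySem.Chars.join_cons_cons, hac]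
          simp

lemma pvJoinLast (g : List (List Char)) (hg : g ≠ []) (h : ∀ t ∈ g, pvGood t) :
    ∃ c cs, (PySem.Chars.join [' '] g).reverse = c :: cs ∧ PySem.Chars.isspace c = false := by
  induction g with
  | nil => exact absurd rfl hg
  | cons a l ih =>
      cases l with
      | nil =>
          obtain ⟨hane, haw⟩ := h a (by simp)
          obtain ⟨c, cs, hac⟩ :=
            List.exists_cons_of_ne_nil (List.reverse_ne_nil_iff.mpr hane)
          refine ⟨c, cs, ?_, ?_⟩
          · rw [PySem.Chars.join_singleton]; exact hac
          · have hcm : c ∈ a.reverse := by rw [hac]; simp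
            exact haw c (List.mem_reverse.mp hcm)
      | cons b l' =>
          obtain ⟨c, cs, hc, hcw⟩ := ih (by simp) (fun t ht => h t (by simp [ht]))
          refine ⟨c, cs ++ (' ' :: a.reverse), ?_, hcw⟩
          rw [PySem.Chars.join_cons_cons]
          simp [hc]

lemma pvPhEq (g : List (List Char)) (hg : g ≠ []) :
    pvPh g = ' ' :: PySem.Chars.join [' '] g := by
  induction g with
  | nil => exact absurd rfl hg
  | cons a l ih =>
      cases l with
      | nil => simp [pvPh, PySem.Chars.join_singleton]
      | cons b l' =>
          have ihh := ih (by simp)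
          rw [PySem.Chars.join_cons_cons]
          simp only [pvPh, List.map_cons, List.flatten_cons] at ihh ⊢
          rw [ihh]
          simp

lemma pvStripPh (g : List (List Char)) (hg : g ≠ []) (h : ∀ t ∈ g, pvGood t) :
    PySem.Chars.strip (pvPh g) = PySem.Chars.join [' '] g := by
  rw [pvPhEq g hg]
  obtain ⟨c, cs, hj, hcw⟩ := pvJoinHead g hg h
  obtain ⟨d, ds, hr, hdw⟩ := pvJoinLast g hg h
  unfold PySem.Chars.strip PySem.Chars.lstrip PySem.Chars.rstrip
  rw [List.dropWhile_cons]
  simp only [show PySem.Chars.isspace ' ' = true from rfl, if_true]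
  rw [hj, List.dropWhile_cons, hcw]
  simp only [Bool.false_eq_true, if_false]
  rw [← hj, hr, List.dropWhile_cons, hdw]
  simp only [Bool.false_eq_true, if_false]
  rw [← hr, List.reverse_reverse]

lemma pvFoldPend :
    ∀ (tokens : List (List Char)) (g rs : List (List Char)),
      (∀ t ∈ tokens, pvGood t) → (∀ t ∈ g, pvGood t) →
      (tokens.foldl pvAStep (rs, pvPh g)).1 = rs ++ pvPend g tokens := by
  intro tokens
  induction tokens with
  | nil => intro g rs _ _; simp [pvPend]
  | cons t rest ih =>
      intro g rs htok hg
      have hgt : ∀ u ∈ g ++ [t], pvGood u := by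
        intro u hu
        rcases List.mem_append.mp hu with h1 | h1
        · exact hg u h1
        · rw [List.mem_singleton] at h1; rw [h1]; exact htok t (by simp)
      have hph : pvPh g ++ ' ' :: t = pvPh (g ++ [t]) := by
        simp [pvPh]
      by_cases hP : PySem.Chars.endswith t ['.', 'm', 'p', '4'] = true
      · have hstep : pvAStep (rs, pvPh g) t =
            (rs ++ [PySem.Chars.join [' '] (g ++ [t])], pvPh ([] : List (List Char))) := by
          unfold pvAStep
          rw [if_pos hP, hph, pvStripPh (g ++ [t]) (by simp) hgt]
          rfl
        rw [List.foldl_cons, hstep,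
          ih [] _ (fun u hu => htok u (List.mem_cons_of_mem _ hu)) (by simp)]
        simp [pvPend, hP]
      · have hstep : pvAStep (rs, pvPh g) t = (rs, pvPh (g ++ [t])) := by
          unfold pvAStep
          rw [if_neg hP, hph]
        rw [List.foldl_cons, hstep,
          ih (g ++ [t]) rs (fun u hu => htok u (List.mem_cons_of_mem _ hu)) hgt]
        simp [pvPend, hP]

lemma pvPendGroups :
    ∀ (tokens g : List (List Char)),
      pvPend g tokens =
        match tokens.findIdx? (fun t => PySem.Chars.endswith t ['.', 'm', 'p', '4']) with
        | none => []
        | some i =>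
            PySem.Chars.join [' '] (g ++ tokens.take (i + 1)) :: pvBGroups (tokens.drop (i + 1)) := by
  intro tokens
  induction tokens with
  | nil => intro g; simp [pvPend]
  | cons t rest ih =>
      intro g
      by_cases hP : PySem.Chars.endswith t ['.', 'm', 'p', '4'] = true
      · simp only [pvPend, List.findIdx?_cons, hP, if_true]
        rw [ih []]
        cases hfi : rest.findIdx? (fun u => PySem.Chars.endswith u ['.', 'm', 'p', '4']) with
        | none => simp [pvBGroupsEq rest, hfi]
        | some i => simp [pvBGroupsEq rest, hfi]
      · simp only [pvPend, List.findIdx?_cons, hP, Bool.false_eq_true, if_false]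
        rw [ih (g ++ [t])]
        cases hfi : rest.findIdx? (fun u => PySem.Chars.endswith u ['.', 'm', 'p', '4']) with
        | none => simp
        | some i => simp [List.append_assoc]

lemma pvGroupsEq (tokens : List (List Char)) (htok : ∀ t ∈ tokens, pvGood t) :
    (tokens.foldl pvAStep ([], [])).1 = pvBGroups tokens := by
  have h := pvFoldPend tokens [] [] htok (by simp)
  have h0 : pvPh [] = ([] : List Char) := by simp [pvPh]
  rw [h0] at h
  rw [h, pvPendGroups tokens [], pvBGroupsEq tokens]
  cases tokens.findIdx? (fun t => PySem.Chars.endswith t ['.', 'm', 'p', '4']) with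
  | none => simp
  | some i => simp

-- ===== VERDICT (by name: the statement is the Claim_ definition above) =====
theorem parse_comma_list_spec : Claim_equal_parse_comma_list := by
  intro path_list _
  unfold Spec_parse_comma_list parse_comma_list parse_comma_list_alt
  show String.ofList
      (PySem.Chars.replace
        (PySem.Chars.join [',']
          ((PySem.Chars.split₀ path_list.toList).foldl pvAStep ([], [])).1)
        [' '] ['\\', ' ']) = _
  rw [pvGroupsEq (PySem.Chars.split₀ path_list.toList) (pvSplitGood path_list.toList)]
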